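-- pv_equiv track=rewrite | github.com/jkammerland/gentest | scripts/bench_release_e2e_compare.py | classify_ninja_outputs
-- ===== SOURCE A (Python) =====
-- def classify_ninja_outputs(outputs: list[str]) -> str:
--     if (
--         any(output.endswith(".artifact_manifest.validated") for output in outputs)
--     ):
--         return "manifest_validation_json"
--     if any(
--         output.endswith(".gentest.h")
--         or output.endswith(".gentest.cpp")
--         or output.endswith("_mock_registry.hpp")
--         or output.endswith("_mock_impl.hpp")
--         or "_mock_registry__domain_" in output
--         or "_mock_impl__domain_" in output
--         or output.endswith(".artifact_manifest.json")
--         for output in outputs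
--     ):
--         return "codegen_execution_emit"
--     if any(output.startswith("src/CMakeFiles/") and output.endswith(".o") for output in outputs):
--         return "runtime_compile"
--     if any(output.startswith("src/libgentest") for output in outputs):
--         return "runtime_archive"
--     if any("/tu_" in output and output.endswith(".gentest.cpp.o") for output in outputs):
--         return "generated_test_tu_compile"
--     if any(output.startswith("tests/CMakeFiles/") and output.endswith(".o") for output in outputs):
--         return "test_support_compile"
--     if any(output.startswith("tests/lib") and output.endswith(".a") for output in outputs):
--         return "test_helper_archive"
--     if any(output.startswith("tests/gentest_") and not output.endswith(".a") for output in outputs):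
--         return "final_test_binary_link"
--     if any("CTestTestfile" in output for output in outputs):
--         return "test_discovery_or_ctest_metadata"
--     if any("tools/CMakeFiles/gentest_codegen.dir" in output or output.endswith("/tools/gentest_codegen") for output in outputs):
--         return "generator_tool"
--     return "other"
-- ===== SOURCE B (Python) =====
-- _LABELS = [
--     "manifest_validation_json",
--     "codegen_execution_emit",
--     "runtime_compile",
--     "runtime_archive",
--     "generated_test_tu_compile",
--     "test_support_compile",
--     "test_helper_archive",
--     "final_test_binary_link",
--     "test_discovery_or_ctest_metadata",
--     "generator_tool",
--     "other",
-- ]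
--
-- _PREDS = [
--     lambda o: o.endswith(".artifact_manifest.validated"),
--     lambda o: (o.endswith(".gentest.h") or o.endswith(".gentest.cpp")
--                or o.endswith("_mock_registry.hpp") or o.endswith("_mock_impl.hpp")
--                or "_mock_registry__domain_" in o or "_mock_impl__domain_" in o
--                or o.endswith(".artifact_manifest.json")),
--     lambda o: o.startswith("src/CMakeFiles/") and o.endswith(".o"),
--     lambda o: o.startswith("src/libgentest"),
--     lambda o: "/tu_" in o and o.endswith(".gentest.cpp.o"),
--     lambda o: o.startswith("tests/CMakeFiles/") and o.endswith(".o"),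
--     lambda o: o.startswith("tests/lib") and o.endswith(".a"),
--     lambda o: o.startswith("tests/gentest_") and not o.endswith(".a"),
--     lambda o: "CTestTestfile" in o,
--     lambda o: ("tools/CMakeFiles/gentest_codegen.dir" in o
--                or o.endswith("/tools/gentest_codegen")),
-- ]
--
--
-- def classify_ninja_outputs(outputs: list[str]) -> str:
--     # single pass: track the best (lowest) matching priority over all outputs
--     best = 10
--     for o in outputs:
--         for i, p in enumerate(_PREDS):
--             if p(o):
--                 best = min(best, i)
--                 break
--     return _LABELS[best]
-- ===== Notes on version B (the rewrite author's own statement) =====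
-- stated objective: alternative
-- what changed: Replaces A's ten sequential any() scans over the whole list with one pass over outputs that keeps the lowest-priority category matched so far (stopping each per-item predicate chain at the current best) and a label table indexed by that minimum.
import Mathlib
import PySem

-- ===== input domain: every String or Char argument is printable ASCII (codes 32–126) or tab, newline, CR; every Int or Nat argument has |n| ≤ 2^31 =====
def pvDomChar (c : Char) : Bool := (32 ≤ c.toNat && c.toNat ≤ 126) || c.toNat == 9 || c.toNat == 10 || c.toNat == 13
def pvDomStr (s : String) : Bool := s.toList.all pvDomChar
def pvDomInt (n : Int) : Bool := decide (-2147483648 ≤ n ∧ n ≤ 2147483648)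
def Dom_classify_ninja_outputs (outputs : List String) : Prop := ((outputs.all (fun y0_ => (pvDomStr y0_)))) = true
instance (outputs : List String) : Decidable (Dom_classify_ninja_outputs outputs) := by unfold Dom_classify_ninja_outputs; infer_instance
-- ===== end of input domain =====

-- B replaces A's ten sequential any() scans by a single pass keeping the lowest matching
-- category priority per the whole list, plus a label table (objective: alternative).

-- ===== PORT A =====
def classify_ninja_outputs (outputs : List String) : String :=
  if outputs.any (fun output => PySem.Str.endswith output ".artifact_manifest.validated") then
    "manifest_validation_json"
  else if outputs.any (fun output =>
      PySem.Str.endswith output ".gentest.h"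
      || PySem.Str.endswith output ".gentest.cpp"
      || PySem.Str.endswith output "_mock_registry.hpp"
      || PySem.Str.endswith output "_mock_impl.hpp"
      || PySem.Str.isIn "_mock_registry__domain_" output
      || PySem.Str.isIn "_mock_impl__domain_" output
      || PySem.Str.endswith output ".artifact_manifest.json") then
    "codegen_execution_emit"
  else if outputs.any (fun output => PySem.Str.startswith output "src/CMakeFiles/" && PySem.Str.endswith output ".o") then
    "runtime_compile"
  else if outputs.any (fun output => PySem.Str.startswith output "src/libgentest") then
    "runtime_archive"
  else if outputs.any (fun output => PySem.Str.isIn "/tu_" output && PySem.Str.endswith output ".gentest.cpp.o") then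
    "generated_test_tu_compile"
  else if outputs.any (fun output => PySem.Str.startswith output "tests/CMakeFiles/" && PySem.Str.endswith output ".o") then
    "test_support_compile"
  else if outputs.any (fun output => PySem.Str.startswith output "tests/lib" && PySem.Str.endswith output ".a") then
    "test_helper_archive"
  else if outputs.any (fun output => PySem.Str.startswith output "tests/gentest_" && !PySem.Str.endswith output ".a") then
    "final_test_binary_link"
  else if outputs.any (fun output => PySem.Str.isIn "CTestTestfile" output) then
    "test_discovery_or_ctest_metadata"
  else if outputs.any (fun output =>
      PySem.Str.isIn "tools/CMakeFiles/gentest_codegen.dir" output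
      || PySem.Str.endswith output "/tools/gentest_codegen") then
    "generator_tool"
  else "other"

-- ===== PORT B =====
-- _LABELS table of Source B (index 10 = "other")
def pvLabels : List String :=
  ["manifest_validation_json", "codegen_execution_emit", "runtime_compile",
   "runtime_archive", "generated_test_tu_compile", "test_support_compile",
   "test_helper_archive", "final_test_binary_link", "test_discovery_or_ctest_metadata",
   "generator_tool", "other"]

-- _PREDS table of Source B: predicate number i
def pvPred (i : Nat) (o : String) : Bool :=
  match i with
  | 0 => PySem.Str.endswith o ".artifact_manifest.validated"
  | 1 => PySem.Str.endswith o ".gentest.h"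
      || PySem.Str.endswith o ".gentest.cpp"
      || PySem.Str.endswith o "_mock_registry.hpp"
      || PySem.Str.endswith o "_mock_impl.hpp"
      || PySem.Str.isIn "_mock_registry__domain_" o
      || PySem.Str.isIn "_mock_impl__domain_" o
      || PySem.Str.endswith o ".artifact_manifest.json"
  | 2 => PySem.Str.startswith o "src/CMakeFiles/" && PySem.Str.endswith o ".o"
  | 3 => PySem.Str.startswith o "src/libgentest"
  | 4 => PySem.Str.isIn "/tu_" o && PySem.Str.endswith o ".gentest.cpp.o"
  | 5 => PySem.Str.startswith o "tests/CMakeFiles/" && PySem.Str.endswith o ".o"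
  | 6 => PySem.Str.startswith o "tests/lib" && PySem.Str.endswith o ".a"
  | 7 => PySem.Str.startswith o "tests/gentest_" && !PySem.Str.endswith o ".a"
  | 8 => PySem.Str.isIn "CTestTestfile" o
  | 9 => PySem.Str.isIn "tools/CMakeFiles/gentest_codegen.dir" o
      || PySem.Str.endswith o "/tools/gentest_codegen"
  | _ => false

-- inner 'for i, p in enumerate(_PREDS): if p(o): … break': first index matching o, if any
def pvFirst (i : Nat) (o : String) : Option Nat :=
  if _h : i < 10 then
    if pvPred i o then some i else pvFirst (i + 1) o
  else none
termination_by 10 - i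

-- loop body: 'if p(o): best = min(best, i)'
def pvStep (best : Nat) (o : String) : Nat :=
  match pvFirst 0 o with
  | some i => min best i
  | none => best

def classify_ninja_outputs_alt (outputs : List String) : String :=
  pvLabels.getD (outputs.foldl pvStep 10) ""

-- ===== PRECONDITION & SPEC =====
def Spec_classify_ninja_outputs (outputs : List String) (out : String) : Prop := out = classify_ninja_outputs_alt outputs
instance (outputs : List String) (out : String) : Decidable (Spec_classify_ninja_outputs outputs out) := by unfold Spec_classify_ninja_outputs; infer_instance

-- ===== CLAIM (what is proved, stated in full; the proofs are below) =====
def Claim_equal_classify_ninja_outputs : Prop := ∀ (outputs : List String), Dom_classify_ninja_outputs outputs → Spec_classify_ninja_outputs outputs (classify_ninja_outputs outputs)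

-- ===== LEMMAS AND PROOFS =====

-- A's priority chain, as an index: first i (from i₀) whose predicate some output matches, else 10
def pvChain (i : Nat) (l : List String) : Nat :=
  if _h : i < 10 then
    if l.any (pvPred i) then i else pvChain (i + 1) l
  else 10
termination_by 10 - i

theorem pvChain_le (i : Nat) (l : List String) : pvChain i l ≤ 10 := by
  fun_induction pvChain i l <;> omega

theorem le_pvChain (i : Nat) (l : List String) (h : i ≤ 10) : i ≤ pvChain i l := by
  fun_induction pvChain i l <;> omega

theorem pvFirst_some_ge (i j : Nat) (o : String) (h : pvFirst i o = some j) : i ≤ j := by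
  fun_induction pvFirst i o with
  | case1 i h' hp => simp_all
  | case2 i h' hp ih => exact le_trans (by omega) (ih h)
  | case3 => simp_all

theorem pvChain_nil (i : Nat) : pvChain i [] = 10 := by
  fun_induction pvChain <;> simp_all

theorem pvChain_cons (i : Nat) (o : String) (rest : List String) (hi : i ≤ 10) :
    pvChain i (o :: rest) =
      (match pvFirst i o with
       | some j => min j (pvChain i rest)
       | none => pvChain i rest) := by
  by_cases h : i < 10
  · rw [pvChain, pvFirst]
    simp only [h, dif_pos, List.any_cons]
    by_cases hp : pvPred i o = true
    · have hcr := le_pvChain i rest hi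
      simp only [hp, Bool.true_or, if_pos]
      exact (Nat.min_eq_left hcr).symm
    · simp only [hp, Bool.false_or, if_neg, Bool.false_eq_true, not_false_eq_true]
      by_cases ha : rest.any (pvPred i) = true
      · have hcr : pvChain i rest = i := by rw [pvChain]; simp [h, ha]
        rw [if_pos ha, hcr]
        cases hf : pvFirst (i + 1) o with
        | none => rfl
        | some j =>
          have := pvFirst_some_ge (i + 1) j o hf
          simp only [Nat.min_def]
          split_ifs <;> omega
      · have hcr : pvChain i rest = pvChain (i + 1) rest := by
          rw [pvChain]; simp [h, ha]
        rw [if_neg (by simp [ha]), hcr]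
        exact pvChain_cons (i + 1) o rest (by omega)
  · have h10 : i = 10 := by omega
    subst h10
    simp [pvChain, pvFirst]
termination_by 10 - i

theorem pvFold_eq (l : List String) : ∀ a : Nat, a ≤ 10 →
    l.foldl pvStep a = min a (pvChain 0 l) := by
  induction l with
  | nil =>
    intro a ha
    rw [List.foldl_nil, pvChain_nil]
    exact (Nat.min_eq_left ha).symm
  | cons o rest ih =>
    intro a ha
    have hstep : pvStep a o ≤ 10 := by
      unfold pvStep
      cases pvFirst 0 o
      · exact ha
      · simp [Nat.min_def]; split_ifs <;> omega
    rw [List.foldl_cons, ih (pvStep a o) hstep, pvChain_cons 0 o rest (by omega)]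
    unfold pvStep
    cases pvFirst 0 o <;> simp [Nat.min_def] <;> first | (split_ifs <;> omega) | omega

set_option maxHeartbeats 1000000 in
theorem A_eq_chain (l : List String) :
    classify_ninja_outputs l = pvLabels.getD (pvChain 0 l) "" := by
  have hch : pvChain 0 l =
      if l.any (pvPred 0) then 0 else if l.any (pvPred 1) then 1
      else if l.any (pvPred 2) then 2 else if l.any (pvPred 3) then 3
      else if l.any (pvPred 4) then 4 else if l.any (pvPred 5) then 5
      else if l.any (pvPred 6) then 6 else if l.any (pvPred 7) then 7
      else if l.any (pvPred 8) then 8 else if l.any (pvPred 9) then 9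
      else 10 := by
    simp [pvChain]
  have e0 : l.any (fun output => PySem.Str.endswith output ".artifact_manifest.validated") = l.any (pvPred 0) := rfl
  have e1 : l.any (fun output =>
      PySem.Str.endswith output ".gentest.h"
      || PySem.Str.endswith output ".gentest.cpp"
      || PySem.Str.endswith output "_mock_registry.hpp"
      || PySem.Str.endswith output "_mock_impl.hpp"
      || PySem.Str.isIn "_mock_registry__domain_" output
      || PySem.Str.isIn "_mock_impl__domain_" output
      || PySem.Str.endswith output ".artifact_manifest.json") = l.any (pvPred 1) := rfl
  have e2 : l.any (fun output => PySem.Str.startswith output "src/CMakeFiles/" && PySem.Str.endswith output ".o") = l.any (pvPred 2) := rfl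
  have e3 : l.any (fun output => PySem.Str.startswith output "src/libgentest") = l.any (pvPred 3) := rfl
  have e4 : l.any (fun output => PySem.Str.isIn "/tu_" output && PySem.Str.endswith output ".gentest.cpp.o") = l.any (pvPred 4) := rfl
  have e5 : l.any (fun output => PySem.Str.startswith output "tests/CMakeFiles/" && PySem.Str.endswith output ".o") = l.any (pvPred 5) := rfl
  have e6 : l.any (fun output => PySem.Str.startswith output "tests/lib" && PySem.Str.endswith output ".a") = l.any (pvPred 6) := rfl
  have e7 : l.any (fun output => PySem.Str.startswith output "tests/gentest_" && !PySem.Str.endswith output ".a") = l.any (pvPred 7) := rfl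
  have e8 : l.any (fun output => PySem.Str.isIn "CTestTestfile" output) = l.any (pvPred 8) := rfl
  have e9 : l.any (fun output =>
      PySem.Str.isIn "tools/CMakeFiles/gentest_codegen.dir" output
      || PySem.Str.endswith output "/tools/gentest_codegen") = l.any (pvPred 9) := rfl
  unfold classify_ninja_outputs
  rw [e0, e1, e2, e3, e4, e5, e6, e7, e8, e9, hch]
  split_ifs <;> rfl

-- ===== VERDICT (by name: the statement is the Claim_ definition above) =====
theorem classify_ninja_outputs_spec : Claim_equal_classify_ninja_outputs := by
  intro outputs _
  unfold Spec_classify_ninja_outputs classify_ninja_outputs_alt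
  rw [A_eq_chain, pvFold_eq outputs 10 (le_refl 10)]
  have := pvChain_le 0 outputs
  congr 1
  omega
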